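-- pv_equiv track=rewrite | github.com/harshitwellnesscoach/WellnessCoachMSK | wellness-coach-msk/backend/services/safety/red_flags.py | evaluate_red_flags
-- ===== SOURCE A (Python) =====
-- from typing import Literal
--
-- RED_FLAG_QUESTIONS: list[dict] = [
--     {
--         "id": "bowel_bladder",
--         "text": "Have you noticed any loss of control of your bladder or bowels recently?",
--         "severity": "block",
--     },
--     {
--         "id": "saddle_numbness",
--         "text": "Do you have numbness or tingling in your groin or inner thighs (saddle area)?",
--         "severity": "block",
--     },
--     {
--         "id": "progressive_weakness",
--         "text": "Have you noticed progressive weakness in one or both legs in the last few days?",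
--         "severity": "block",
--     },
--     {
--         "id": "unexplained_weight_loss",
--         "text": "Have you had unexplained weight loss of more than 5 kg in the past 3 months?",
--         "severity": "warn",
--     },
--     {
--         "id": "night_pain",
--         "text": "Is your back pain worse at night and does it wake you from sleep?",
--         "severity": "warn",
--     },
--     {
--         "id": "fever",
--         "text": "Have you had a fever, chills, or felt generally unwell along with your back pain?",
--         "severity": "warn",
--     },
-- ]
--
-- def evaluate_red_flags(
--     answers: dict[str, bool],
-- ) -> Literal["safe", "warn", "block"]:
--     """
--     Given a dict of {question_id: bool}, return safety classification.
--
--     'block' -- one or more block-severity questions answered True.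
--                User must not proceed; show emergency referral message.
--     'warn'  -- one or more warn-severity questions answered True.
--                Proceed but flag for clinical review.
--     'safe'  -- all answers False.
--     """
--     question_map = {q["id"]: q for q in RED_FLAG_QUESTIONS}
--     result: Literal["safe", "warn", "block"] = "safe"
--
--     for question_id, answered_yes in answers.items():
--         if not answered_yes:
--             continue
--         question = question_map.get(question_id)
--         if question is None:
--             continue
--         if question["severity"] == "block":
--             return "block"  # any block answer is immediately block
--         if question["severity"] == "warn":
--             result = "warn"
--
--     return result
-- ===== SOURCE B (Python) =====
-- from typing import Literal
--
-- RED_FLAG_QUESTIONS: list[dict] = [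
--     {
--         "id": "bowel_bladder",
--         "text": "Have you noticed any loss of control of your bladder or bowels recently?",
--         "severity": "block",
--     },
--     {
--         "id": "saddle_numbness",
--         "text": "Do you have numbness or tingling in your groin or inner thighs (saddle area)?",
--         "severity": "block",
--     },
--     {
--         "id": "progressive_weakness",
--         "text": "Have you noticed progressive weakness in one or both legs in the last few days?",
--         "severity": "block",
--     },
--     {
--         "id": "unexplained_weight_loss",
--         "text": "Have you had unexplained weight loss of more than 5 kg in the past 3 months?",
--         "severity": "warn",
--     },
--     {
--         "id": "night_pain",
--         "text": "Is your back pain worse at night and does it wake you from sleep?",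
--         "severity": "warn",
--     },
--     {
--         "id": "fever",
--         "text": "Have you had a fever, chills, or felt generally unwell along with your back pain?",
--         "severity": "warn",
--     },
-- ]
--
-- BLOCK_IDS = {q["id"] for q in RED_FLAG_QUESTIONS if q["severity"] == "block"}
-- WARN_IDS = {q["id"] for q in RED_FLAG_QUESTIONS if q["severity"] == "warn"}
--
--
-- def evaluate_red_flags(
--     answers: dict[str, bool],
-- ) -> Literal["safe", "warn", "block"]:
--     yes = {qid for qid, v in answers.items() if v}
--     if yes & BLOCK_IDS:
--         return "block"
--     if yes & WARN_IDS:
--         return "warn"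
--     return "safe"
-- ===== Notes on version B (the rewrite author's own statement) =====
-- stated objective: simpler
-- what changed: Replaces the early-returning branching loop over answers (with a per-answer dict lookup and severity string comparisons) by two precomputed severity id-sets and two set-intersection tests over the set of affirmative ids.
import Mathlib
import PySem

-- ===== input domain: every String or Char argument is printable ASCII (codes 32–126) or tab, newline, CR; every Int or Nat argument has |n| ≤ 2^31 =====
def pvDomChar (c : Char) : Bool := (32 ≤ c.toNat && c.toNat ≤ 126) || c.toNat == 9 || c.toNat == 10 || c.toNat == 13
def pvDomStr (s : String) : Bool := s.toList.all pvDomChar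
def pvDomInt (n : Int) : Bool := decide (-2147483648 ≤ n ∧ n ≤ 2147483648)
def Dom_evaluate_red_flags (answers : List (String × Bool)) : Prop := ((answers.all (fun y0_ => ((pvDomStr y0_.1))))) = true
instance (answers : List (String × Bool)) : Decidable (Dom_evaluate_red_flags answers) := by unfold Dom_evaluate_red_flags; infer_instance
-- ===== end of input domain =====

-- B replaces A's early-returning branching loop by two precomputed severity id-sets and
-- two set-intersection tests over the set of affirmative ids (objective: simpler).

-- Shared module constant RED_FLAG_QUESTIONS: each question as (id, text, severity).
def redFlagQuestions : List (String × String × String) :=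
  [ ("bowel_bladder", "Have you noticed any loss of control of your bladder or bowels recently?", "block"),
    ("saddle_numbness", "Do you have numbness or tingling in your groin or inner thighs (saddle area)?", "block"),
    ("progressive_weakness", "Have you noticed progressive weakness in one or both legs in the last few days?", "block"),
    ("unexplained_weight_loss", "Have you had unexplained weight loss of more than 5 kg in the past 3 months?", "warn"),
    ("night_pain", "Is your back pain worse at night and does it wake you from sleep?", "warn"),
    ("fever", "Have you had a fever, chills, or felt generally unwell along with your back pain?", "warn") ]

-- ===== PORT A =====
-- question_map = {q["id"]: q for q in RED_FLAG_QUESTIONS}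
def questionMapA : PySem.Dict String (String × String × String) :=
  redFlagQuestions.foldl (fun d q => d.insert q.1 q) PySem.Dict.empty

-- the 'for question_id, answered_yes in answers.items()' loop, with accumulator `result`
def evalLoopA : List (String × Bool) → String → String
  | [], result => result
  | (question_id, answered_yes) :: rest, result =>
    if !answered_yes then evalLoopA rest result
    else
      match questionMapA.get? question_id with
      | none => evalLoopA rest result
      | some question =>
        if question.2.2 == "block" then "block"
        else if question.2.2 == "warn" then evalLoopA rest "warn"
        else evalLoopA rest result

def evaluate_red_flags (answers : List (String × Bool)) : String :=
  evalLoopA answers "safe"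

-- ===== PORT B =====
-- BLOCK_IDS / WARN_IDS precomputed from RED_FLAG_QUESTIONS
def blockIds : PySem.Set String :=
  PySem.Set.ofList ((redFlagQuestions.filter (fun q => q.2.2 == "block")).map (·.1))
def warnIds : PySem.Set String :=
  PySem.Set.ofList ((redFlagQuestions.filter (fun q => q.2.2 == "warn")).map (·.1))

def evaluate_red_flags_alt (answers : List (String × Bool)) : String :=
  let yes : PySem.Set String := PySem.Set.ofList ((answers.filter (·.2)).map (·.1))
  if PySem.Set.inter yes blockIds ≠ [] then "block"
  else if PySem.Set.inter yes warnIds ≠ [] then "warn"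
  else "safe"

-- ===== PRECONDITION & SPEC =====
def Spec_evaluate_red_flags (answers : List (String × Bool)) (out : String) : Prop := out = evaluate_red_flags_alt answers
instance (answers : List (String × Bool)) (out : String) : Decidable (Spec_evaluate_red_flags answers out) := by unfold Spec_evaluate_red_flags; infer_instance

-- ===== CLAIM (what is proved, stated in full; the proofs are below) =====
def Claim_equal_evaluate_red_flags : Prop := ∀ (answers : List (String × Bool)), Dom_evaluate_red_flags answers → Spec_evaluate_red_flags answers (evaluate_red_flags answers)

-- ===== LEMMAS AND PROOFS =====

-- shared characterisation predicates: is some affirmative answer a block / warn question?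
def hasBlock (answers : List (String × Bool)) : Bool :=
  answers.any (fun p => p.2 && (blockIds.contains p.1))
def hasWarn (answers : List (String × Bool)) : Bool :=
  answers.any (fun p => p.2 && (warnIds.contains p.1))

lemma qm_get_other (qid : String) (h0 : qid ≠ "bowel_bladder") (h1 : qid ≠ "saddle_numbness") (h2 : qid ≠ "progressive_weakness") (h3 : qid ≠ "unexplained_weight_loss") (h4 : qid ≠ "night_pain") (h5 : qid ≠ "fever") :
    questionMapA.get? qid = none := by
  simp [questionMapA, redFlagQuestions, List.foldl, PySem.Dict.get?_insert,
        h0, h1, h2, h3, h4, h5, PySem.Dict.get?_empty]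

lemma cb_other (qid : String) (h0 : qid ≠ "bowel_bladder") (h1 : qid ≠ "saddle_numbness")
    (h2 : qid ≠ "progressive_weakness") : List.contains blockIds qid = false := by
  rw [show blockIds = ["bowel_bladder", "saddle_numbness", "progressive_weakness"] from rfl]
  simp [h0, h1, h2]

lemma cw_other (qid : String) (h3 : qid ≠ "unexplained_weight_loss") (h4 : qid ≠ "night_pain")
    (h5 : qid ≠ "fever") : List.contains warnIds qid = false := by
  rw [show warnIds = ["unexplained_weight_loss", "night_pain", "fever"] from rfl]
  simp [h3, h4, h5]

lemma evalLoopA_char (answers : List (String × Bool)) (result : String) :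
    evalLoopA answers result =
      if hasBlock answers then "block"
      else if hasWarn answers then "warn" else result := by
  induction answers generalizing result with
  | nil => simp [evalLoopA, hasBlock, hasWarn]
  | cons p rest ih =>
    obtain ⟨qid, yes⟩ := p
    by_cases hy : yes
    case neg =>
      have hyf : yes = false := by simpa using hy
      subst hyf
      have hstep : evalLoopA ((qid, false) :: rest) result = evalLoopA rest result := rfl
      have hb : hasBlock ((qid, false) :: rest) = hasBlock rest := by
        rw [show hasBlock ((qid, false) :: rest) = (false || hasBlock rest) from rfl]
        exact Bool.false_or _
      have hw : hasWarn ((qid, false) :: rest) = hasWarn rest := by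
        rw [show hasWarn ((qid, false) :: rest) = (false || hasWarn rest) from rfl]
        exact Bool.false_or _
      rw [hstep, ih, hb, hw]
    subst hy
    by_cases h0 : qid = "bowel_bladder"
    case pos =>
      subst h0
      have hstep : evalLoopA (("bowel_bladder", true) :: rest) result = "block" := rfl
      have hb : hasBlock (("bowel_bladder", true) :: rest) = true := by
        rw [show hasBlock (("bowel_bladder", true) :: rest) = (true || hasBlock rest) from rfl]
        exact Bool.true_or _
      rw [hstep, hb]
      rfl
    case neg =>
      by_cases h1 : qid = "saddle_numbness"
      case pos =>
        subst h1
        have hstep : evalLoopA (("saddle_numbness", true) :: rest) result = "block" := rfl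
        have hb : hasBlock (("saddle_numbness", true) :: rest) = true := by
          rw [show hasBlock (("saddle_numbness", true) :: rest) = (true || hasBlock rest) from rfl]
          exact Bool.true_or _
        rw [hstep, hb]
        rfl
      case neg =>
        by_cases h2 : qid = "progressive_weakness"
        case pos =>
          subst h2
          have hstep : evalLoopA (("progressive_weakness", true) :: rest) result = "block" := rfl
          have hb : hasBlock (("progressive_weakness", true) :: rest) = true := by
            rw [show hasBlock (("progressive_weakness", true) :: rest) = (true || hasBlock rest) from rfl]
            exact Bool.true_or _
          rw [hstep, hb]
          rfl
        case neg =>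
          by_cases h3 : qid = "unexplained_weight_loss"
          case pos =>
            subst h3
            have hstep : evalLoopA (("unexplained_weight_loss", true) :: rest) result = evalLoopA rest "warn" := rfl
            have hb : hasBlock (("unexplained_weight_loss", true) :: rest) = hasBlock rest := by
              rw [show hasBlock (("unexplained_weight_loss", true) :: rest) = (false || hasBlock rest) from rfl]
              exact Bool.false_or _
            have hw : hasWarn (("unexplained_weight_loss", true) :: rest) = true := by
              rw [show hasWarn (("unexplained_weight_loss", true) :: rest) = (true || hasWarn rest) from rfl]
              exact Bool.true_or _
            rw [hstep, ih, hb, hw]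
            split_ifs <;> simp_all
          case neg =>
            by_cases h4 : qid = "night_pain"
            case pos =>
              subst h4
              have hstep : evalLoopA (("night_pain", true) :: rest) result = evalLoopA rest "warn" := rfl
              have hb : hasBlock (("night_pain", true) :: rest) = hasBlock rest := by
                rw [show hasBlock (("night_pain", true) :: rest) = (false || hasBlock rest) from rfl]
                exact Bool.false_or _
              have hw : hasWarn (("night_pain", true) :: rest) = true := by
                rw [show hasWarn (("night_pain", true) :: rest) = (true || hasWarn rest) from rfl]
                exact Bool.true_or _
              rw [hstep, ih, hb, hw]
              split_ifs <;> simp_all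
            case neg =>
              by_cases h5 : qid = "fever"
              case pos =>
                subst h5
                have hstep : evalLoopA (("fever", true) :: rest) result = evalLoopA rest "warn" := rfl
                have hb : hasBlock (("fever", true) :: rest) = hasBlock rest := by
                  rw [show hasBlock (("fever", true) :: rest) = (false || hasBlock rest) from rfl]
                  exact Bool.false_or _
                have hw : hasWarn (("fever", true) :: rest) = true := by
                  rw [show hasWarn (("fever", true) :: rest) = (true || hasWarn rest) from rfl]
                  exact Bool.true_or _
                rw [hstep, ih, hb, hw]
                split_ifs <;> simp_all
              have hstep : evalLoopA ((qid, true) :: rest) result = evalLoopA rest result := by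
                simp only [evalLoopA, qm_get_other qid h0 h1 h2 h3 h4 h5, Bool.not_true, Bool.false_eq_true,
                           if_false]
              have hb : hasBlock ((qid, true) :: rest) = hasBlock rest := by
                rw [show hasBlock ((qid, true) :: rest) = ((true && List.contains blockIds qid) || hasBlock rest) from rfl,
                    cb_other qid h0 h1 h2]
                rfl
              have hw : hasWarn ((qid, true) :: rest) = hasWarn rest := by
                rw [show hasWarn ((qid, true) :: rest) = ((true && List.contains warnIds qid) || hasWarn rest) from rfl,
                    cw_other qid h3 h4 h5]
                rfl
              rw [hstep, ih, hb, hw]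

lemma inter_ne_nil_iff_any (answers : List (String × Bool)) (t : PySem.Set String) :
    (PySem.Set.inter (PySem.Set.ofList ((answers.filter (·.2)).map (·.1))) t ≠ []) ↔
      answers.any (fun p => p.2 && t.contains p.1) = true := by
  rw [← List.isEmpty_eq_false_iff, ← Bool.not_eq_true, List.isEmpty_iff]
  constructor
  · intro h
    rcases List.exists_mem_of_ne_nil _ h with ⟨x, hx⟩
    have hx' : x ∈ PySem.Set.ofList ((answers.filter (·.2)).map (·.1)) ∧ x ∈ t :=
      (PySem.Set.mem_inter _ _ x).1 hx
    have hxs : x ∈ (answers.filter (·.2)).map (·.1) := by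
      have hm := hx'.1
      simpa [pysem] using hm
    rcases List.mem_map.1 hxs with ⟨p, hp, hpx⟩
    have hpf := List.mem_filter.1 hp
    refine List.any_eq_true.2 ⟨p, hpf.1, ?_⟩
    simp only [Bool.and_eq_true]
    refine ⟨by simpa using hpf.2, ?_⟩
    have hmt : p.1 ∈ t := hpx ▸ hx'.2
    simpa using hmt
  · intro h hnil
    rcases List.any_eq_true.1 h with ⟨p, hp, hpt⟩
    simp only [Bool.and_eq_true] at hpt
    have hmem : p.1 ∈ PySem.Set.inter (PySem.Set.ofList ((answers.filter (·.2)).map (·.1))) t := by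
      refine (PySem.Set.mem_inter _ _ _).2 ⟨?_, ?_⟩
      · have hm : p.1 ∈ (answers.filter (·.2)).map (·.1) :=
          List.mem_map.2 ⟨p, List.mem_filter.2 ⟨hp, by simpa using hpt.1⟩, rfl⟩
        simpa [pysem] using hm
      · simpa using hpt.2
    rw [hnil] at hmem
    simp at hmem

lemma alt_char (answers : List (String × Bool)) :
    evaluate_red_flags_alt answers =
      if hasBlock answers then "block"
      else if hasWarn answers then "warn" else "safe" := by
  unfold evaluate_red_flags_alt hasBlock hasWarn
  by_cases hb : answers.any (fun p => p.2 && (blockIds.contains p.1)) = true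
  · rw [if_pos ((inter_ne_nil_iff_any answers blockIds).2 hb), if_pos hb]
  · rw [if_neg (fun h => hb ((inter_ne_nil_iff_any answers blockIds).1 h)), if_neg hb]
    by_cases hw : answers.any (fun p => p.2 && (warnIds.contains p.1)) = true
    · rw [if_pos ((inter_ne_nil_iff_any answers warnIds).2 hw), if_pos hw]
    · rw [if_neg (fun h => hw ((inter_ne_nil_iff_any answers warnIds).1 h)), if_neg hw]

-- ===== VERDICT (by name: the statement is the Claim_ definition above) =====
theorem evaluate_red_flags_spec : Claim_equal_evaluate_red_flags := by
  intro answers _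
  unfold Spec_evaluate_red_flags evaluate_red_flags
  rw [evalLoopA_char, alt_char]
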